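-- pv_equiv track=rewrite | github.com/wlkaqw/python | 9.py | func911
-- ===== SOURCE A (Python) =====
-- def inz(n):
--     if n==1:
--         return 1
--     lst=[]
--     for i in range(1,n+1):
--         if n%i==0:
--             lst.append(i)
--     return len(lst)
--
-- def func911(tp):
--     dic={}
--     for i in tp:
--         count=inz(i)
--         if count not in dic:
--             dic[count]=[]
--         dic[count].append(i)
--     for i in dic:
--         dic[i].sort()
--     return tuple(sorted(dic.items(),key=lambda x:-x[0]))
-- ===== SOURCE B (Python) =====
-- def inz(n):
--     if n==1:
--         return 1
--     lst=[]
--     for i in range(1,n+1):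
--         if n%i==0:
--             lst.append(i)
--     return len(lst)
--
-- def func911(tp):
--     counts = [inz(i) for i in tp]
--     keys = sorted(set(counts), reverse=True)
--     return tuple((k, sorted(n for n, c in zip(tp, counts) if c == k))
--                  for k in keys)
-- ===== Notes on version B (the rewrite author's own statement) =====
-- stated objective: simpler
-- what changed: Replaces the dict-bucketing with in-place per-bucket sorts and a final key-sort of the items by a comprehension: compute each number's divisor count once, take the distinct counts sorted descending, and for each count emit the ascending sort of the numbers having that count.
import Mathlib
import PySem

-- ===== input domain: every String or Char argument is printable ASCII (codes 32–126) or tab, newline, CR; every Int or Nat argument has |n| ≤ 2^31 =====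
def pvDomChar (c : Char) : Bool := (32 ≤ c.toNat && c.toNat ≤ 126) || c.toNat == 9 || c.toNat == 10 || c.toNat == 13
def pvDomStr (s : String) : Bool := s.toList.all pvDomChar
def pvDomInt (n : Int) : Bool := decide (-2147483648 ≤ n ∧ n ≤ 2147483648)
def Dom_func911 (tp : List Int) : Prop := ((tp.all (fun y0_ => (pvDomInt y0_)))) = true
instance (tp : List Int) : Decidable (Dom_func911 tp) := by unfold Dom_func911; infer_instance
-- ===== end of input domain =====

-- B computes the distinct divisor-counts sorted descending and filters per count,
-- instead of A's dict-bucketing with per-bucket in-place sorts and a final key-sort (objective: simpler).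

-- ===== PORT A =====
-- shared helper: divisor count (identical in Source A and Source B)
def inz (n : Int) : Int :=
  if n = 1 then 1
  else ((PySem.List.pyRange 1 (n + 1) 1).foldl
          (fun lst i => if PySem.Int.mod n i = 0 then lst ++ [i] else lst) ([] : List Int)).length

def func911 (tp : List Int) : List (Int × List Int) :=
  let dic := tp.foldl (fun d i =>
      let count := inz i
      let d' := if d.contains count then d else d.insert count ([] : List Int)
      d'.modify count [] (fun l => l ++ [i])) PySem.Dict.empty
  let dic2 := dic.keys.foldl (fun d k => d.modify k [] (fun l => PySem.List.sorted l (fun x => x) false)) dic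
  PySem.List.sorted dic2.items (fun x => -x.1) false

-- ===== PORT B =====
def func911_alt (tp : List Int) : List (Int × List Int) :=
  let counts := tp.map inz
  let keys := PySem.List.sorted (PySem.Set.ofList counts) (fun x => x) true
  keys.map (fun k =>
    (k, PySem.List.sorted (((tp.zip counts).filter (fun p => p.2 == k)).map (fun p => p.1)) (fun x => x) false))

-- ===== PRECONDITION & SPEC =====
def Spec_func911 (tp : List Int) (out : List (Int × List Int)) : Prop := out = func911_alt tp
instance (tp : List Int) (out : List (Int × List Int)) : Decidable (Spec_func911 tp out) := by unfold Spec_func911; infer_instance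

-- ===== CLAIM (what is proved, stated in full; the proofs are below) =====
def Claim_equal_func911 : Prop := ∀ (tp : List Int), Dom_func911 tp → Spec_func911 tp (func911 tp)

-- ===== LEMMAS AND PROOFS =====

-- A's bucket-building step
def stepA (d : PySem.Dict Int (List Int)) (i : Int) : PySem.Dict Int (List Int) :=
  let count := inz i
  let d' := if d.contains count then d else d.insert count ([] : List Int)
  d'.modify count [] (fun l => l ++ [i])

lemma getD_stepA (d : PySem.Dict Int (List Int)) (i k : Int) :
    (stepA d i).getD k [] = if inz i = k then d.getD k [] ++ [i] else d.getD k [] := by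
  unfold stepA
  by_cases hc : d.contains (inz i)
  · simp only [hc, if_true]
    by_cases hk : inz i = k
    · subst hk; simp [PySem.Dict.getD_modify_self]
    · rw [PySem.Dict.getD_modify_of_ne _ _ _ (Ne.symm hk)]; simp [hk]
  · simp only [hc, Bool.false_eq_true, if_false]
    by_cases hk : inz i = k
    · subst hk
      rw [PySem.Dict.getD_modify_self, PySem.Dict.getD_insert_self,
          PySem.Dict.getD_of_not_contains d _ (by simpa using hc)]
      simp
    · rw [PySem.Dict.getD_modify_of_ne _ _ _ (Ne.symm hk),
          PySem.Dict.getD_insert_of_ne _ _ _ (Ne.symm hk)]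
      simp [hk]

lemma keys_stepA (d : PySem.Dict Int (List Int)) (i : Int) :
    (stepA d i).keys = PySem.Set.add d.keys (inz i) := by
  unfold stepA PySem.Set.add
  by_cases hc : d.contains (inz i)
  · simp only [hc, if_true]
    rw [PySem.Dict.keys_modify, PySem.Dict.keys_insert_of_contains _ _ hc]
    have hm : inz i ∈ d.keys := (PySem.Dict.contains_iff_mem_keys d (inz i)).mp hc
    simp [hm]
  · simp only [hc, Bool.false_eq_true, if_false]
    rw [PySem.Dict.keys_modify, PySem.Dict.keys_insert_of_contains _ _ (by simp [PySem.Dict.contains_insert_self]),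
        PySem.Dict.keys_insert_of_not_contains _ _ (eq_false_of_ne_true hc)]
    have hm : inz i ∉ d.keys := fun h =>
      hc ((PySem.Dict.contains_iff_mem_keys d (inz i)).mpr h)
    simp [hm]

lemma getD_foldA (tp : List Int) : ∀ (d : PySem.Dict Int (List Int)) (k : Int),
    (tp.foldl stepA d).getD k [] = d.getD k [] ++ tp.filter (fun i => inz i == k) := by
  induction tp with
  | nil => intro d k; simp
  | cons x xs ih =>
    intro d k
    simp only [List.foldl_cons, List.filter_cons]
    rw [ih, getD_stepA]
    by_cases hk : inz x = k <;> simp [hk]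

lemma keys_foldA (tp : List Int) : ∀ (d : PySem.Dict Int (List Int)),
    (tp.foldl stepA d).keys = PySem.Set.update d.keys (tp.map inz) := by
  induction tp with
  | nil => intro d; rfl
  | cons x xs ih =>
    intro d
    simp only [List.foldl_cons, List.map_cons]
    rw [ih, keys_stepA]
    rfl

lemma set_update_self (s : PySem.Set Int) : ∀ (l : List Int), (∀ x ∈ l, x ∈ s) → PySem.Set.update s l = s := by
  intro l
  induction l with
  | nil => intro _; rfl
  | cons x xs ih =>
    intro h
    have hx : PySem.Set.add s x = s := by
      unfold PySem.Set.add
      simp [h x (by simp)]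
    show PySem.Set.update (PySem.Set.add s x) xs = s
    rw [hx]
    exact ih (fun y hy => h y (by simp [hy]))

lemma getD_foldMod (g : List Int → List Int) (l : List Int) (hl : l.Nodup) :
    ∀ (d : PySem.Dict Int (List Int)) (k : Int),
    (l.foldl (fun d x => d.modify x [] g) d).getD k [] =
      if k ∈ l then g (d.getD k []) else d.getD k [] := by
  induction l with
  | nil => intro d k; simp
  | cons x xs ih =>
    intro d k
    simp only [List.foldl_cons]
    rw [ih (by exact hl.of_cons)]
    by_cases hk : k = x
    · subst hk
      have : k ∉ xs := by simpa using (List.nodup_cons.mp hl).1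
      simp [this, PySem.Dict.getD_modify_self]
    · by_cases hm : k ∈ xs
      · simp [hm, hk, PySem.Dict.getD_modify_of_ne _ _ _ hk]
      · simp [hm, hk, PySem.Dict.getD_modify_of_ne _ _ _ hk]

lemma filter_zip_eq (tp : List Int) (k : Int) :
    ((tp.zip (tp.map inz)).filter (fun p => p.2 == k)).map (fun p => p.1)
      = tp.filter (fun i => inz i == k) := by
  induction tp with
  | nil => simp
  | cons a l ih =>
    simp only [List.map_cons, List.zip_cons_cons, List.filter_cons]
    by_cases h : inz a = k <;> simp [h, ih]

lemma map_sorted_rev (S : List Int) (hS : S.Nodup) (v : Int → List Int) :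
    PySem.List.sorted (S.map (fun k => (k, v k))) (fun x => -x.1) false
      = (PySem.List.sorted S (fun x => x) true).map (fun k => (k, v k)) := by
  apply PySem.List.sorted_eq_of_perm_of_pairwise_lt
  · exact (PySem.List.sorted_perm S _ true).map _
  · rw [List.pairwise_map]
    have h1 := PySem.List.sorted_pairwise_rev S (fun x => x)
    have h2 : (PySem.List.sorted S (fun x => x) true).Nodup :=
      ((PySem.List.sorted_perm S _ true).nodup_iff).mpr hS
    have := h1.and h2
    refine this.imp ?_
    rintro a b ⟨hle, hne⟩
    have : b < a := lt_of_le_of_ne hle (Ne.symm hne)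
    simpa using this

-- ===== VERDICT (by name: the statement is the Claim_ definition above) =====
theorem func911_spec : Claim_equal_func911 := by
  intro tp _
  unfold Spec_func911 func911 func911_alt
  simp only []
  have hstep : (tp.foldl (fun d i =>
      let count := inz i
      let d' := if d.contains count then d else d.insert count ([] : List Int)
      d'.modify count [] (fun l => l ++ [i])) PySem.Dict.empty) = tp.foldl stepA PySem.Dict.empty := rfl
  rw [hstep]
  set dic := tp.foldl stepA PySem.Dict.empty with hdic
  have hkeys : dic.keys = PySem.Set.ofList (tp.map inz) := by
    rw [hdic, keys_foldA]
    rfl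
  have hnd : dic.keys.Nodup := by rw [hkeys]; exact PySem.Set.nodup_ofList _
  have hget : ∀ k, dic.getD k [] = tp.filter (fun i => inz i == k) := by
    intro k; rw [hdic, getD_foldA]; simp
  set dic2 := dic.keys.foldl (fun d k => d.modify k [] (fun l => PySem.List.sorted l (fun x => x) false)) dic with hdic2
  have hkeys2 : dic2.keys = dic.keys := by
    rw [hdic2]
    rw [show (dic.keys.foldl (fun d k => d.modify k [] (fun l => PySem.List.sorted l (fun x => x) false)) dic)
        = (dic.keys.foldl (fun d k => d.modify (id k) [] ((fun (_ : PySem.Dict Int (List Int)) (_ : Int) (l : List Int) => PySem.List.sorted l (fun x => x) false) d k)) dic) from rfl]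
    rw [PySem.Dict.keys_foldl_modify_key dic.keys id [] _ dic]
    simp only [List.map_id]
    exact set_update_self dic.keys dic.keys (fun x hx => hx)
  have hget2 : ∀ k ∈ dic2.keys, dic2.getD k [] = PySem.List.sorted (tp.filter (fun i => inz i == k)) (fun x => x) false := by
    intro k hk
    rw [hdic2, getD_foldMod _ _ hnd]
    rw [hkeys2] at hk
    simp [hk, hget]
  have hitems : dic2.items = dic2.keys.map (fun k => (k, dic2.getD k [])) :=
    PySem.Dict.items_eq_map_keys dic2 (by rw [hkeys2]; exact hnd) []
  rw [hitems, List.map_congr_left (fun k hk => by rw [hget2 k hk])]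
  rw [hkeys2, hkeys]
  rw [map_sorted_rev _ (PySem.Set.nodup_ofList _)]
  congr 1
  funext k
  rw [filter_zip_eq]
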